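-- pv_equiv track=rewrite | github.com/aicatalyst-team/autopoc | src/autopoc/cli.py | _extract_plan_preview
-- ===== SOURCE A (Python) =====
-- def _extract_plan_preview(plan_content: str, max_lines: int = 15) -> str:
--     """Extract a concise preview from the PoC plan markdown.
--
--     Tries to show the most useful sections: Project Classification,
--     PoC Objectives, and Test Scenarios summary. Falls back to the
--     first max_lines lines if no sections are found.
--     """
--     lines = plan_content.strip().splitlines()
--     if not lines:
--         return ""
--
--     preview_parts: list[str] = []
--     in_section = False
--     section_count = 0
--     target_sections = {
--         "project classification",
--         "poc objectives",
--         "infrastructure requirements",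
--         "test scenarios",
--     }
--
--     for line in lines:
--         stripped = line.strip().lower()
--         # Detect section headers (## level)
--         if stripped.startswith("## "):
--             section_name = stripped.lstrip("# ").strip()
--             if any(target in section_name for target in target_sections):
--                 in_section = True
--                 section_count += 1
--                 preview_parts.append(line)
--                 continue
--             else:
--                 if in_section:
--                     in_section = False
--                 continue
--         # Detect next section at same or higher level (stop current)
--         if stripped.startswith("# ") and in_section:
--             in_section = False
--             continue
--
--         if in_section:
--             preview_parts.append(line)
--
--     if preview_parts:
--         return "\n".join(preview_parts).strip()
--
--     # Fallback: return the first max_lines lines, skipping the title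
--     start = 1 if lines[0].startswith("# ") else 0
--     return "\n".join(lines[start : start + max_lines]).strip()
-- ===== SOURCE B (Python) =====
-- TARGETS = (
--     "project classification",
--     "poc objectives",
--     "infrastructure requirements",
--     "test scenarios",
-- )
--
--
-- def _is_target_header(header: str) -> bool:
--     name = header.strip().lower().lstrip("# ").strip()
--     return any(t in name for t in TARGETS)
--
--
-- def _extract_plan_preview(plan_content: str, max_lines: int = 15) -> str:
--     """Two-pass variant: group lines into '## '-headed sections, then emit the
--     target sections."""
--     lines = plan_content.strip().splitlines()
--     if not lines:
--         return ""
--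
--     # Pass 1: group into sections (header line, body lines). A '## ' header
--     # opens a new section; a lone '# ' header closes the current one; other
--     # lines belong to the open section (or to no section at all).
--     sections = []
--     header = None
--     body = []
--     for line in lines:
--         s = line.strip().lower()
--         if s.startswith("## "):
--             if header is not None:
--                 sections.append((header, body))
--             header, body = line, []
--         elif s.startswith("# "):
--             if header is not None:
--                 sections.append((header, body))
--             header, body = None, []
--         elif header is not None:
--             body.append(line)
--     if header is not None:
--         sections.append((header, body))
--
--     # Pass 2: keep only the target sections, in order.
--     out = []
--     for h, b in sections:
--         if _is_target_header(h):
--             out.append(h)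
--             out.extend(b)
--
--     if out:
--         return "\n".join(out).strip()
--
--     # Fallback: first max_lines lines, skipping a leading '# ' title.
--     start = 1 if lines[0].startswith("# ") else 0
--     return "\n".join(lines[start:start + max_lines]).strip()
-- ===== Notes on version B (the rewrite author's own statement) =====
-- stated objective: alternative
-- what changed: A's single stateful scan (an in_section flag deciding line by line what to append) is replaced by two passes: first group the lines into sections (header line plus body lines), then emit the sections whose title contains a target phrase.
import Mathlib
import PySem

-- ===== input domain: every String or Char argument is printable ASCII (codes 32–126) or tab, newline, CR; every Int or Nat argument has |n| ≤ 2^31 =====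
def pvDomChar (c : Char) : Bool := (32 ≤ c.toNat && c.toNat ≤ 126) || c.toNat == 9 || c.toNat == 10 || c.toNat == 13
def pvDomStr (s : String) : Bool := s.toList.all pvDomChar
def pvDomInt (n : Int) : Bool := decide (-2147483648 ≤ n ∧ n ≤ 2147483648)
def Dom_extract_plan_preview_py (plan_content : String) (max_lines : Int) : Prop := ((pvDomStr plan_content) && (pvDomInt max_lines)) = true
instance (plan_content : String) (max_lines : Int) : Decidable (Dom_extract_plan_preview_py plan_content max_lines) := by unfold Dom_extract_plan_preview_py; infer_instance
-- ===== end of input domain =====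

-- B re-implements A's single stateful scan as two passes (group the lines into level-2-header-led
-- sections using the same header tests, then emit the target sections); objective: alternative decomposition, same cost.

-- Python str.lstrip("# "): drop leading chars from the set {'#',' '} (hand port, exact:
-- PySem has no lstrip-with-chars primitive); used by both Pythons.
def pvLstripHashSpace (s : String) : String :=
  String.ofList (s.toList.dropWhile (fun c => c == '#' || c == ' '))

-- ===== PORT A =====
-- Python set literal target_sections (distinct string literals, iterated only by any(...))
def pvTargetSectionsA : PySem.Set String :=
  PySem.Set.ofList ["project classification", "poc objectives",
                    "infrastructure requirements", "test scenarios"]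

-- A's loop body (state: (preview_parts, in_section); section_count is write-only in A and omitted)
def pvAStep (st : List String × Bool) (line : String) : List String × Bool :=
  let stripped := PySem.Str.lower (PySem.Str.strip line)
  if PySem.Str.startswith stripped "## " then
    let section_name := PySem.Str.strip (pvLstripHashSpace stripped)
    if pvTargetSectionsA.any (fun t => PySem.Str.isIn t section_name) then
      (st.1 ++ [line], true)
    else
      (st.1, false)
  else if PySem.Str.startswith stripped "# " && st.2 then
    (st.1, false)
  else if st.2 then (st.1 ++ [line], st.2) else st

def extract_plan_preview_py (plan_content : String) (max_lines : Int) : String :=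
  let lines := PySem.Str.splitlines (PySem.Str.strip plan_content)
  if lines = [] then ""
  else
    let preview_parts := (lines.foldl pvAStep ([], false)).1
    if preview_parts ≠ [] then
      PySem.Str.strip (PySem.Str.join "\n" preview_parts)
    else
      let start : Int := if PySem.Str.startswith (lines.headD "") "# " then 1 else 0
      PySem.Str.strip (PySem.Str.join "\n" (PySem.List.slice lines (some start) (some (start + max_lines))))

-- ===== PORT B =====
def pvTargetsB : List String :=
  ["project classification", "poc objectives",
   "infrastructure requirements", "test scenarios"]

def pvIsTargetHeader (header : String) : Bool :=
  let name := PySem.Str.strip (pvLstripHashSpace (PySem.Str.lower (PySem.Str.strip header)))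
  pvTargetsB.any (fun t => PySem.Str.isIn t name)

-- close the open section (Python's `if header is not None: sections.append((header, body))`)
def pvClose (secs : List (String × List String)) (header : Option String)
    (body : List String) : List (String × List String) :=
  match header with
  | some h => secs ++ [(h, body)]
  | none => secs

-- B's pass-1 loop body (state: (sections, header, body))
def pvBStep (st : List (String × List String) × Option String × List String)
    (line : String) : List (String × List String) × Option String × List String :=
  let s := PySem.Str.lower (PySem.Str.strip line)
  if PySem.Str.startswith s "## " then
    (pvClose st.1 st.2.1 st.2.2, some line, [])
  else if PySem.Str.startswith s "# " then
    (pvClose st.1 st.2.1 st.2.2, none, [])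
  else
    match st.2.1 with
    | some _ => (st.1, st.2.1, st.2.2 ++ [line])
    | none => st

-- B's pass-2 loop body
def pvOutStep (acc : List String) (hb : String × List String) : List String :=
  if pvIsTargetHeader hb.1 then acc ++ hb.1 :: hb.2 else acc

def extract_plan_preview_py_alt (plan_content : String) (max_lines : Int) : String :=
  let lines := PySem.Str.splitlines (PySem.Str.strip plan_content)
  if lines = [] then ""
  else
    let st := lines.foldl pvBStep ([], none, [])
    let sections := pvClose st.1 st.2.1 st.2.2
    let out := sections.foldl pvOutStep []
    if out ≠ [] then
      PySem.Str.strip (PySem.Str.join "\n" out)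
    else
      let start : Int := if PySem.Str.startswith (lines.headD "") "# " then 1 else 0
      PySem.Str.strip (PySem.Str.join "\n" (PySem.List.slice lines (some start) (some (start + max_lines))))

-- ===== PRECONDITION & SPEC =====
def Spec_extract_plan_preview_py (plan_content : String) (max_lines : Int) (out : String) : Prop := out = extract_plan_preview_py_alt plan_content max_lines
instance (plan_content : String) (max_lines : Int) (out : String) : Decidable (Spec_extract_plan_preview_py plan_content max_lines out) := by unfold Spec_extract_plan_preview_py; infer_instance

-- ===== CLAIM (what is proved, stated in full; the proofs are below) =====
def Claim_equal_extract_plan_preview_py : Prop := ∀ (plan_content : String) (max_lines : Int), Dom_extract_plan_preview_py plan_content max_lines → Spec_extract_plan_preview_py plan_content max_lines (extract_plan_preview_py plan_content max_lines)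

-- ===== LEMMAS AND PROOFS =====

-- what pass 2 emits from a list of sections
def pvEmit (secs : List (String × List String)) : List String :=
  secs.flatMap (fun hb => if pvIsTargetHeader hb.1 then hb.1 :: hb.2 else [])

-- what the open section contributes to A's preview_parts
def pvOpenEmit (header : Option String) (body : List String) : List String :=
  match header with
  | some h => if pvIsTargetHeader h then h :: body else []
  | none => []

-- A's in_section flag in terms of B's open section
def pvOpenTgt (header : Option String) : Bool :=
  match header with
  | some h => pvIsTargetHeader h
  | none => false

-- A's loop state as a function of B's pass-1 state
def pvAbs (st : List (String × List String) × Option String × List String) :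
    List String × Bool :=
  (pvEmit st.1 ++ pvOpenEmit st.2.1 st.2.2, pvOpenTgt st.2.1)

theorem pvEmit_close (secs : List (String × List String)) (header : Option String)
    (body : List String) :
    pvEmit (pvClose secs header body) = pvEmit secs ++ pvOpenEmit header body := by
  cases header <;> simp [pvClose, pvEmit, pvOpenEmit, List.flatMap_append]

-- A's header-target test is B's helper
theorem pvTargetTest_eq (line : String) :
    (pvTargetSectionsA.any (fun t =>
        PySem.Str.isIn t (PySem.Str.strip (pvLstripHashSpace (PySem.Str.lower (PySem.Str.strip line))))))
      = pvIsTargetHeader line := rfl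

-- one step of A's loop simulates one step of B's pass 1
theorem pvStep_sim (st : List (String × List String) × Option String × List String)
    (line : String) : pvAStep (pvAbs st) line = pvAbs (pvBStep st line) := by
  obtain ⟨secs, header, body⟩ := st
  unfold pvAStep pvBStep pvAbs
  simp only [pvTargetTest_eq]
  cases header with
  | none =>
    by_cases h2 : PySem.Chars.startswith (PySem.Chars.lower (PySem.Chars.strip line.toList)) ['#', '#', ' '] = true
    · by_cases ht : pvIsTargetHeader line = true <;>
        simp [h2, ht, pvClose, pvEmit, pvOpenEmit, pvOpenTgt]
    · by_cases h1 : PySem.Chars.startswith (PySem.Chars.lower (PySem.Chars.strip line.toList)) ['#', ' '] = true <;>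
        simp [h2, h1, pvClose, pvEmit, pvOpenEmit, pvOpenTgt]
  | some h =>
    by_cases h2 : PySem.Chars.startswith (PySem.Chars.lower (PySem.Chars.strip line.toList)) ['#', '#', ' '] = true
    · by_cases ht : pvIsTargetHeader line = true <;>
        by_cases hh : pvIsTargetHeader h = true <;>
          simp [h2, ht, hh, pvClose, pvEmit, pvOpenEmit, pvOpenTgt]
    · by_cases h1 : PySem.Chars.startswith (PySem.Chars.lower (PySem.Chars.strip line.toList)) ['#', ' '] = true <;>
        by_cases hh : pvIsTargetHeader h = true <;>
          simp [h2, h1, hh, pvClose, pvEmit, pvOpenEmit, pvOpenTgt]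

-- the whole loops agree (fold the simulation through the list)
theorem pvLoop_eq (ls : List String) :
    ls.foldl pvAStep ([], false) = pvAbs (ls.foldl pvBStep ([], none, [])) := by
  exact List.foldl_hom (g₁ := pvBStep) (g₂ := pvAStep) (l := ls)
    (init := ([], none, [])) pvAbs pvStep_sim

-- B's pass 2 computes pvEmit
theorem pvOut_eq (secs : List (String × List String)) :
    secs.foldl pvOutStep [] = pvEmit secs := by
  have hf : pvOutStep = fun acc hb =>
      acc ++ (if pvIsTargetHeader hb.1 then hb.1 :: hb.2 else []) := by
    funext acc hb
    by_cases h : pvIsTargetHeader hb.1 = true <;> simp [pvOutStep, h]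
  rw [hf, PySem.List.foldl_append_eq_flatMap]
  simp [pvEmit]

-- ===== VERDICT (by name: the statement is the Claim_ definition above) =====
theorem extract_plan_preview_py_spec : Claim_equal_extract_plan_preview_py := by
  intro plan_content max_lines _
  unfold Spec_extract_plan_preview_py extract_plan_preview_py extract_plan_preview_py_alt
  by_cases hnil : PySem.Str.splitlines (PySem.Str.strip plan_content) = []
  · simp only [hnil, if_true]
  · simp only [hnil, if_false]
    rw [pvLoop_eq, pvOut_eq]
    rw [show (pvAbs ((PySem.Str.splitlines (PySem.Str.strip plan_content)).foldl pvBStep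
        ([], none, []))).1 = pvEmit (pvClose
          ((PySem.Str.splitlines (PySem.Str.strip plan_content)).foldl pvBStep ([], none, [])).1
          ((PySem.Str.splitlines (PySem.Str.strip plan_content)).foldl pvBStep ([], none, [])).2.1
          ((PySem.Str.splitlines (PySem.Str.strip plan_content)).foldl pvBStep ([], none, [])).2.2)
      from by rw [pvEmit_close]; rfl]
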